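-- pv_equiv track=rewrite | github.com/yuwei97910/is445-group30-final-project | data_cleaning_cat.py | give_unique_cat
-- ===== SOURCE A (Python) =====
-- def give_unique_cat(cat_list: list):
--     cat_list = [x.replace(' ', '') for x in cat_list]
--     unique_category = 'Others'
--     if 'Restaurants' in cat_list or 'Food' in cat_list or 'Cafeteria' in cat_list:
--         unique_category = 'Food'
--     if 'Hotel&Travel' in cat_list or 'Hotels' in cat_list :
--         unique_category = 'Hotels'
--     if 'Bars' in cat_list or 'Beer' in cat_list:
--         unique_category = 'Bars'
--     # if 'Cafeteria' in cat_list: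
--     #     unique_category = 'Cafeteria'
--     if 'Pharmacy' in cat_list or 'Doctors' in cat_list or 'Health&Medical' in cat_list:
--         unique_category = 'Health & Medical'
--     if 'Shopping' in cat_list:
--         unique_category = 'Shopping'
--     if 'Arts&Entertainment' in cat_list:
--         unique_category = 'Arts & Entertainment'
--     if 'Financial Services' in cat_list:
--         unique_category = 'Financial Services'
--     if 'Automotive' in cat_list:
--         unique_category = 'Automotive'
--     if 'ActiveLife' in cat_list:
--         unique_category = 'Active Life'
--
--     return unique_category
-- ===== SOURCE B (Python) =====
-- RANKS = {
--     'Restaurants': 1, 'Food': 1, 'Cafeteria': 1,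
--     'Hotel&Travel': 2, 'Hotels': 2,
--     'Bars': 3, 'Beer': 3,
--     'Pharmacy': 4, 'Doctors': 4, 'Health&Medical': 4,
--     'Shopping': 5,
--     'Arts&Entertainment': 6,
--     'FinancialServices': 7,
--     'Automotive': 8,
--     'ActiveLife': 9,
-- }
-- LABELS = ['Others', 'Food', 'Hotels', 'Bars', 'Health & Medical',
--           'Shopping', 'Arts & Entertainment', 'Financial Services',
--           'Automotive', 'Active Life']
--
-- def give_unique_cat(cat_list: list):
--     best = 0
--     for x in cat_list:
--         best = max(best, RANKS.get(x.replace(' ', ''), 0))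
--     return LABELS[best]
-- ===== Notes on version B (the rewrite author's own statement) =====
-- stated objective: alternative
-- what changed: Instead of A's nine-branch if-chain that rescans the whole list per keyword, B makes a single pass over the input keeping the maximum priority rank seen (via a keyword-to-rank dict), then returns the label at that rank from a table; B also fixes the 'Financial Services' trigger, which in A compares a spaced literal against a space-stripped list and can never fire.
-- intended difference: On inputs where some category strips to 'FinancialServices' and none strips to 'Automotive' or 'ActiveLife', A returns a lower-priority label (e.g. 'Others') because it tests the literal 'Financial Services' against a list whose spaces were all removed, so that branch can never fire; B returns 'Financial Services', the evidently intended label. — e.g. on give_unique_cat(["Financial Services"]): A returns "Others", B returns "Financial Services"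
import Mathlib
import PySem

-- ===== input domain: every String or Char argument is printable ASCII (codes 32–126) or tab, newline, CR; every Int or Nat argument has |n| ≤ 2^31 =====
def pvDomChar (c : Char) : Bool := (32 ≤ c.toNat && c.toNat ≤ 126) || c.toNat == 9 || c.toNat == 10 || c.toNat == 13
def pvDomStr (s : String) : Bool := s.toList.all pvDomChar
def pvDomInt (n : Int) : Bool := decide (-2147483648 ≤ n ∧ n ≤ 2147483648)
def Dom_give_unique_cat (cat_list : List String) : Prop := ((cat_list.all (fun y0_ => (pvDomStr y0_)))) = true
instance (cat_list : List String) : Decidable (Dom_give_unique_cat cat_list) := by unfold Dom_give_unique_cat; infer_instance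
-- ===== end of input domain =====

-- B replaces A's nine-branch if-chain of repeated whole-list membership scans by a single
-- pass over the input that keeps the maximum priority rank seen (keyword→rank dict, then one
-- label-table lookup) — objective: alternative; B also fixes A's dead
-- 'Financial Services' test, which can never match a space-stripped list (see D_ below).


-- x.replace(' ', '') — shared helper of both ports and of D_
def pvStrip (s : String) : String := PySem.Str.replace s " " ""

-- ===== PORT A =====
def give_unique_cat (cat_list : List String) : String :=
  let cl := cat_list.map pvStrip
  let u0 := "Others"
  let u1 := if cl.contains "Restaurants" || cl.contains "Food" || cl.contains "Cafeteria" then "Food" else u0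
  let u2 := if cl.contains "Hotel&Travel" || cl.contains "Hotels" then "Hotels" else u1
  let u3 := if cl.contains "Bars" || cl.contains "Beer" then "Bars" else u2
  let u4 := if cl.contains "Pharmacy" || cl.contains "Doctors" || cl.contains "Health&Medical" then "Health & Medical" else u3
  let u5 := if cl.contains "Shopping" then "Shopping" else u4
  let u6 := if cl.contains "Arts&Entertainment" then "Arts & Entertainment" else u5
  let u7 := if cl.contains "Financial Services" then "Financial Services" else u6
  let u8 := if cl.contains "Automotive" then "Automotive" else u7
  let u9 := if cl.contains "ActiveLife" then "Active Life" else u8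
  u9

-- ===== PORT B =====
-- module-level RANKS dict of Source B (keyword -> priority rank)
def pvRanks : PySem.Dict String Nat := PySem.Dict.ofList
  [ ("Restaurants", 1), ("Food", 1), ("Cafeteria", 1),
    ("Hotel&Travel", 2), ("Hotels", 2),
    ("Bars", 3), ("Beer", 3),
    ("Pharmacy", 4), ("Doctors", 4), ("Health&Medical", 4),
    ("Shopping", 5),
    ("Arts&Entertainment", 6),
    ("FinancialServices", 7),
    ("Automotive", 8),
    ("ActiveLife", 9) ]

-- module-level LABELS table of Source B
def pvLabels : List String :=
  [ "Others", "Food", "Hotels", "Bars", "Health & Medical",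
    "Shopping", "Arts & Entertainment", "Financial Services",
    "Automotive", "Active Life" ]

def give_unique_cat_alt (cat_list : List String) : String :=
  let best := cat_list.foldl (fun b x => max b (PySem.Dict.getD pvRanks (pvStrip x) 0)) 0
  -- LABELS[best]; best ≤ 9 < |LABELS| always, so the Python index never raises
  pvLabels.getD best ""

-- ===== PRECONDITION & SPEC =====
-- On inputs where some category strips to 'FinancialServices' and none strips to 'Automotive' or
-- 'ActiveLife', A returns a lower-priority label (e.g. 'Others') because it tests the literal
-- 'Financial Services' against a list whose spaces were all removed, so that branch can never
-- fire; B returns 'Financial Services', the evidently intended label.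
def D_give_unique_cat (cat_list : List String) : Prop :=
  "FinancialServices" ∈ cat_list.map pvStrip ∧
  "Automotive" ∉ cat_list.map pvStrip ∧
  "ActiveLife" ∉ cat_list.map pvStrip
instance (cat_list : List String) : Decidable (D_give_unique_cat cat_list) := by
  unfold D_give_unique_cat; infer_instance

def Spec_give_unique_cat (cat_list : List String) (out : String) : Prop :=
  ¬ D_give_unique_cat cat_list → out = give_unique_cat_alt cat_list
instance (cat_list : List String) (out : String) : Decidable (Spec_give_unique_cat cat_list out) := by
  unfold Spec_give_unique_cat; infer_instance

def pvDiffWitness_give_unique_cat : List String := ["Financial Services"]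
def pvDiffWitnessOut_give_unique_cat : String × String := ("Others", "Financial Services")

-- ===== CLAIM =====
def Claim_unchanged_give_unique_cat : Prop := ∀ (cat_list : List String), Dom_give_unique_cat cat_list → Spec_give_unique_cat cat_list (give_unique_cat cat_list)
def Claim_changed_give_unique_cat : Prop := Dom_give_unique_cat (pvDiffWitness_give_unique_cat) ∧ D_give_unique_cat (pvDiffWitness_give_unique_cat) ∧ give_unique_cat (pvDiffWitness_give_unique_cat) = pvDiffWitnessOut_give_unique_cat.1 ∧ give_unique_cat_alt (pvDiffWitness_give_unique_cat) = pvDiffWitnessOut_give_unique_cat.2 ∧ pvDiffWitnessOut_give_unique_cat.1 ≠ pvDiffWitnessOut_give_unique_cat.2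
def Claim_exact_give_unique_cat : Prop := ∀ (cat_list : List String), Dom_give_unique_cat cat_list → D_give_unique_cat cat_list → give_unique_cat cat_list ≠ give_unique_cat_alt cat_list

-- ===== LEMMAS AND PROOFS =====

-- the rank of one stripped string, as B looks it up
def pvR (s : String) : Nat := PySem.Dict.getD pvRanks s 0

def pvItems : List (String × Nat) :=
  [ ("Restaurants", 1), ("Food", 1), ("Cafeteria", 1),
    ("Hotel&Travel", 2), ("Hotels", 2),
    ("Bars", 3), ("Beer", 3),
    ("Pharmacy", 4), ("Doctors", 4), ("Health&Medical", 4),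
    ("Shopping", 5),
    ("Arts&Entertainment", 6),
    ("FinancialServices", 7),
    ("Automotive", 8),
    ("ActiveLife", 9) ]

-- every lookup result is 0 (absent key) or one of the listed keyword/rank pairs
theorem pvR_mem (s : String) : pvR s = 0 ∨ (s, pvR s) ∈ pvItems := by
  unfold pvR
  rw [PySem.Dict.getD_eq_get?_getD]
  cases h : PySem.Dict.get? pvRanks s with
  | none => left; rfl
  | some v =>
    right
    have hm := PySem.Dict.mem_items_of_get?_eq_some pvRanks h
    have hit : pvRanks.items = pvItems := rfl
    rw [hit] at hm
    simpa using hm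

-- B's accumulator and generic foldl-max bounds
def pvBest (cat_list : List String) : Nat :=
  cat_list.foldl (fun b x => max b (PySem.Dict.getD pvRanks (pvStrip x) 0)) 0

theorem pvBest_mono (l : List String) (b : Nat) :
    b ≤ l.foldl (fun b x => max b (PySem.Dict.getD pvRanks (pvStrip x) 0)) b := by
  induction l generalizing b with
  | nil => simp
  | cons a t ih => exact le_trans (le_max_left _ _) (ih _)

theorem pvBest_le (cat_list : List String) (k : Nat)
    (h : ∀ key ∈ cat_list.map pvStrip, pvR key ≤ k) : pvBest cat_list ≤ k := by
  unfold pvBest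
  suffices H : ∀ (l : List String) (b : Nat), b ≤ k → (∀ x ∈ l, pvR (pvStrip x) ≤ k) →
      l.foldl (fun b x => max b (PySem.Dict.getD pvRanks (pvStrip x) 0)) b ≤ k by
    exact H cat_list 0 (Nat.zero_le k)
      (fun x hx => h (pvStrip x) (List.mem_map_of_mem hx))
  intro l
  induction l with
  | nil => intro b hb _; simpa using hb
  | cons a t ih =>
    intro b hb hl
    simp only [List.foldl_cons]
    exact ih _ (by simpa [pvR] using Nat.max_le.mpr ⟨hb, hl a (by simp)⟩)
      (fun x hx => hl x (by simp [hx]))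

theorem pvBest_ge_key (cat_list : List String) (key : String)
    (hk : key ∈ cat_list.map pvStrip) : pvR key ≤ pvBest cat_list := by
  rcases List.mem_map.mp hk with ⟨x, hx, rfl⟩
  unfold pvBest
  suffices H : ∀ (l : List String) (b : Nat), x ∈ l →
      pvR (pvStrip x) ≤ l.foldl (fun b x => max b (PySem.Dict.getD pvRanks (pvStrip x) 0)) b by
    exact H cat_list 0 hx
  intro l
  induction l with
  | nil => intro b h; simp at h
  | cons a t ih =>
    intro b h
    simp only [List.foldl_cons]
    rcases List.mem_cons.mp h with h | h
    · subst h
      exact le_trans (show pvR (pvStrip x) ≤ max b (pvR (pvStrip x)) from le_max_right _ _)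
        (pvBest_mono t _)
    · exact ih _ h

-- the stripped list never contains a string with a space
theorem pv_go_no_space (fuel : Nat) (l acc : List Char)
    (hf : l.length ≤ fuel) (ha : ' ' ∉ acc) :
    ' ' ∉ PySem.Chars.replace.go [' '] [] fuel l acc := by
  induction fuel generalizing l acc with
  | zero =>
    cases l with
    | nil => simpa [PySem.Chars.replace.go] using ha
    | cons c t => simp at hf
  | succ n ih =>
    cases l with
    | nil => simpa [PySem.Chars.replace.go] using ha
    | cons c t =>
      by_cases hp : [' '].isPrefixOf (c :: t) = true
      · simp only [PySem.Chars.replace.go, hp, if_pos]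
        exact ih _ _ (by simp at hf ⊢; omega) (by simpa using ha)
      · have hc : c ≠ ' ' := by
          intro h; apply hp; simp [List.isPrefixOf, h]
        simp only [PySem.Chars.replace.go, hp, if_neg, Bool.false_eq_true, not_false_iff]
        refine ih _ _ (by simp at hf ⊢; omega) ?_
        intro h
        rcases List.mem_cons.mp h with h | h
        · exact hc h.symm
        · exact ha h

theorem pv_strip_no_space (s : String) : ' ' ∉ (pvStrip s).toList := by
  unfold pvStrip
  rw [PySem.Str.toList_replace]
  have h1 : (" " : String).toList = [' '] := rfl
  have h2 : ("" : String).toList = [] := rfl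
  rw [h1, h2]
  unfold PySem.Chars.replace
  simp only [List.isEmpty_cons, if_false, Bool.false_eq_true]
  exact pv_go_no_space _ _ _ le_rfl (by simp)

theorem pv_fs_not_mem (cat_list : List String) :
    "Financial Services" ∉ cat_list.map pvStrip := by
  simp only [List.mem_map, not_exists, not_and]
  intro s _ h
  have := pv_strip_no_space s
  rw [h] at this
  exact this (by decide)

-- ===== VERDICT =====
set_option maxHeartbeats 1000000 in
theorem give_unique_cat_spec : Claim_unchanged_give_unique_cat := by
  intro cat_list _hDom
  unfold Spec_give_unique_cat
  intro hND
  have halt : give_unique_cat_alt cat_list = pvLabels.getD (pvBest cat_list) "" := rfl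
  have hbest : ∀ (k : Nat) (key : String), (∀ j ∈ cat_list.map pvStrip, pvR j ≤ k) →
      key ∈ cat_list.map pvStrip → pvR key = k → pvBest cat_list = k := by
    intro k key hub hkm hkr
    exact le_antisymm (pvBest_le _ _ hub) (hkr ▸ pvBest_ge_key _ _ hkm)
  have hfs := pv_fs_not_mem cat_list
  unfold give_unique_cat
  rw [halt]
  simp only [List.contains_eq_mem, Bool.or_eq_true, decide_eq_true_eq]
  by_cases h9 : "ActiveLife" ∈ cat_list.map pvStrip
  · have hub : ∀ j ∈ cat_list.map pvStrip, pvR j ≤ 9 := by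
      intro j hj
      rcases pvR_mem j with h | h
      · omega
      · simp only [pvItems, List.mem_cons, List.not_mem_nil, or_false, Prod.mk.injEq] at h
        rcases h with (⟨hs,hr⟩|⟨hs,hr⟩|⟨hs,hr⟩|⟨hs,hr⟩|⟨hs,hr⟩|⟨hs,hr⟩|⟨hs,hr⟩|⟨hs,hr⟩|⟨hs,hr⟩|⟨hs,hr⟩|⟨hs,hr⟩|⟨hs,hr⟩|⟨hs,hr⟩|⟨hs,hr⟩|⟨hs,hr⟩) <;> omega
    rw [hbest 9 "ActiveLife" hub h9 rfl, if_pos h9]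
    rfl
  · rw [if_neg h9]
    by_cases h8 : "Automotive" ∈ cat_list.map pvStrip
    · have hub : ∀ j ∈ cat_list.map pvStrip, pvR j ≤ 8 := by
        intro j hj
        rcases pvR_mem j with h | h
        · omega
        · simp only [pvItems, List.mem_cons, List.not_mem_nil, or_false, Prod.mk.injEq] at h
          rcases h with (⟨hs,hr⟩|⟨hs,hr⟩|⟨hs,hr⟩|⟨hs,hr⟩|⟨hs,hr⟩|⟨hs,hr⟩|⟨hs,hr⟩|⟨hs,hr⟩|⟨hs,hr⟩|⟨hs,hr⟩|⟨hs,hr⟩|⟨hs,hr⟩|⟨hs,hr⟩|⟨hs,hr⟩|⟨hs,hr⟩) <;> subst hs <;>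
            first | omega | exact absurd hj (by assumption)
      rw [hbest 8 "Automotive" hub h8 rfl, if_pos h8]
      rfl
    · rw [if_neg h8, if_neg hfs]
      have h7 : "FinancialServices" ∉ cat_list.map pvStrip := fun h => hND ⟨h, h8, h9⟩
      by_cases h6 : "Arts&Entertainment" ∈ cat_list.map pvStrip
      · have hub : ∀ j ∈ cat_list.map pvStrip, pvR j ≤ 6 := by
          intro j hj
          rcases pvR_mem j with h | h
          · omega
          · simp only [pvItems, List.mem_cons, List.not_mem_nil, or_false, Prod.mk.injEq] at h
            rcases h with (⟨hs,hr⟩|⟨hs,hr⟩|⟨hs,hr⟩|⟨hs,hr⟩|⟨hs,hr⟩|⟨hs,hr⟩|⟨hs,hr⟩|⟨hs,hr⟩|⟨hs,hr⟩|⟨hs,hr⟩|⟨hs,hr⟩|⟨hs,hr⟩|⟨hs,hr⟩|⟨hs,hr⟩|⟨hs,hr⟩) <;> subst hs <;>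
              first | omega | exact absurd hj (by assumption)
        rw [hbest 6 "Arts&Entertainment" hub h6 rfl, if_pos h6]
        rfl
      · rw [if_neg h6]
        by_cases h5 : "Shopping" ∈ cat_list.map pvStrip
        · have hub : ∀ j ∈ cat_list.map pvStrip, pvR j ≤ 5 := by
            intro j hj
            rcases pvR_mem j with h | h
            · omega
            · simp only [pvItems, List.mem_cons, List.not_mem_nil, or_false, Prod.mk.injEq] at h
              rcases h with (⟨hs,hr⟩|⟨hs,hr⟩|⟨hs,hr⟩|⟨hs,hr⟩|⟨hs,hr⟩|⟨hs,hr⟩|⟨hs,hr⟩|⟨hs,hr⟩|⟨hs,hr⟩|⟨hs,hr⟩|⟨hs,hr⟩|⟨hs,hr⟩|⟨hs,hr⟩|⟨hs,hr⟩|⟨hs,hr⟩) <;> subst hs <;>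
                first | omega | exact absurd hj (by assumption)
          rw [hbest 5 "Shopping" hub h5 rfl, if_pos h5]
          rfl
        · rw [if_neg h5]
          by_cases h4 : ("Pharmacy" ∈ cat_list.map pvStrip ∨ "Doctors" ∈ cat_list.map pvStrip) ∨ "Health&Medical" ∈ cat_list.map pvStrip
          · have h4' := h4
            have hkey : ∃ key ∈ cat_list.map pvStrip, pvR key = 4 := by
              rcases h4 with (h | h) | h
              exacts [⟨_, h, rfl⟩, ⟨_, h, rfl⟩, ⟨_, h, rfl⟩]
            obtain ⟨key, hkm, hkr⟩ := hkey
            have hub : ∀ j ∈ cat_list.map pvStrip, pvR j ≤ 4 := by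
              intro j hj
              rcases pvR_mem j with h | h
              · omega
              · simp only [pvItems, List.mem_cons, List.not_mem_nil, or_false, Prod.mk.injEq] at h
                rcases h with (⟨hs,hr⟩|⟨hs,hr⟩|⟨hs,hr⟩|⟨hs,hr⟩|⟨hs,hr⟩|⟨hs,hr⟩|⟨hs,hr⟩|⟨hs,hr⟩|⟨hs,hr⟩|⟨hs,hr⟩|⟨hs,hr⟩|⟨hs,hr⟩|⟨hs,hr⟩|⟨hs,hr⟩|⟨hs,hr⟩) <;> subst hs <;>
                  first | omega | exact absurd hj (by assumption)
            rw [hbest 4 key hub hkm hkr, if_pos h4']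
            rfl
          · have h4' := h4
            push_neg at h4'
            obtain ⟨⟨h4a, h4b⟩, h4c⟩ := h4'
            rw [if_neg h4]
            by_cases h3 : "Bars" ∈ cat_list.map pvStrip ∨ "Beer" ∈ cat_list.map pvStrip
            · have h3' := h3
              have hkey : ∃ key ∈ cat_list.map pvStrip, pvR key = 3 := by
                rcases h3 with h | h
                exacts [⟨_, h, rfl⟩, ⟨_, h, rfl⟩]
              obtain ⟨key, hkm, hkr⟩ := hkey
              have hub : ∀ j ∈ cat_list.map pvStrip, pvR j ≤ 3 := by
                intro j hj
                rcases pvR_mem j with h | h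
                · omega
                · simp only [pvItems, List.mem_cons, List.not_mem_nil, or_false, Prod.mk.injEq] at h
                  rcases h with (⟨hs,hr⟩|⟨hs,hr⟩|⟨hs,hr⟩|⟨hs,hr⟩|⟨hs,hr⟩|⟨hs,hr⟩|⟨hs,hr⟩|⟨hs,hr⟩|⟨hs,hr⟩|⟨hs,hr⟩|⟨hs,hr⟩|⟨hs,hr⟩|⟨hs,hr⟩|⟨hs,hr⟩|⟨hs,hr⟩) <;> subst hs <;>
                    first | omega | exact absurd hj (by assumption)
              rw [hbest 3 key hub hkm hkr, if_pos h3']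
              rfl
            · have h3' := h3
              push_neg at h3'
              obtain ⟨h3a, h3b⟩ := h3'
              rw [if_neg h3]
              by_cases h2 : "Hotel&Travel" ∈ cat_list.map pvStrip ∨ "Hotels" ∈ cat_list.map pvStrip
              · have h2' := h2
                have hkey : ∃ key ∈ cat_list.map pvStrip, pvR key = 2 := by
                  rcases h2 with h | h
                  exacts [⟨_, h, rfl⟩, ⟨_, h, rfl⟩]
                obtain ⟨key, hkm, hkr⟩ := hkey
                have hub : ∀ j ∈ cat_list.map pvStrip, pvR j ≤ 2 := by
                  intro j hj
                  rcases pvR_mem j with h | h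
                  · omega
                  · simp only [pvItems, List.mem_cons, List.not_mem_nil, or_false, Prod.mk.injEq] at h
                    rcases h with (⟨hs,hr⟩|⟨hs,hr⟩|⟨hs,hr⟩|⟨hs,hr⟩|⟨hs,hr⟩|⟨hs,hr⟩|⟨hs,hr⟩|⟨hs,hr⟩|⟨hs,hr⟩|⟨hs,hr⟩|⟨hs,hr⟩|⟨hs,hr⟩|⟨hs,hr⟩|⟨hs,hr⟩|⟨hs,hr⟩) <;> subst hs <;>
                      first | omega | exact absurd hj (by assumption)
                rw [hbest 2 key hub hkm hkr, if_pos h2']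
                rfl
              · have h2' := h2
                push_neg at h2'
                obtain ⟨h2a, h2b⟩ := h2'
                rw [if_neg h2]
                by_cases h1 : ("Restaurants" ∈ cat_list.map pvStrip ∨ "Food" ∈ cat_list.map pvStrip) ∨ "Cafeteria" ∈ cat_list.map pvStrip
                · have h1' := h1
                  have hkey : ∃ key ∈ cat_list.map pvStrip, pvR key = 1 := by
                    rcases h1 with (h | h) | h
                    exacts [⟨_, h, rfl⟩, ⟨_, h, rfl⟩, ⟨_, h, rfl⟩]
                  obtain ⟨key, hkm, hkr⟩ := hkey
                  have hub : ∀ j ∈ cat_list.map pvStrip, pvR j ≤ 1 := by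
                    intro j hj
                    rcases pvR_mem j with h | h
                    · omega
                    · simp only [pvItems, List.mem_cons, List.not_mem_nil, or_false, Prod.mk.injEq] at h
                      rcases h with (⟨hs,hr⟩|⟨hs,hr⟩|⟨hs,hr⟩|⟨hs,hr⟩|⟨hs,hr⟩|⟨hs,hr⟩|⟨hs,hr⟩|⟨hs,hr⟩|⟨hs,hr⟩|⟨hs,hr⟩|⟨hs,hr⟩|⟨hs,hr⟩|⟨hs,hr⟩|⟨hs,hr⟩|⟨hs,hr⟩) <;> subst hs <;>
                        first | omega | exact absurd hj (by assumption)
                  rw [hbest 1 key hub hkm hkr, if_pos h1']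
                  rfl
                · have h1' := h1
                  push_neg at h1'
                  obtain ⟨⟨h1a, h1b⟩, h1c⟩ := h1'
                  rw [if_neg h1]
                  have hub : ∀ j ∈ cat_list.map pvStrip, pvR j ≤ 0 := by
                    intro j hj
                    rcases pvR_mem j with h | h
                    · omega
                    · simp only [pvItems, List.mem_cons, List.not_mem_nil, or_false, Prod.mk.injEq] at h
                      rcases h with (⟨hs,hr⟩|⟨hs,hr⟩|⟨hs,hr⟩|⟨hs,hr⟩|⟨hs,hr⟩|⟨hs,hr⟩|⟨hs,hr⟩|⟨hs,hr⟩|⟨hs,hr⟩|⟨hs,hr⟩|⟨hs,hr⟩|⟨hs,hr⟩|⟨hs,hr⟩|⟨hs,hr⟩|⟨hs,hr⟩) <;> subst hs <;>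
                        first | omega | exact absurd hj (by assumption)
                  rw [show pvBest cat_list = 0 from Nat.le_zero.mp (pvBest_le _ _ hub)]
                  rfl

set_option maxHeartbeats 1000000 in
theorem give_unique_cat_changed : Claim_changed_give_unique_cat := by
  unfold Claim_changed_give_unique_cat; decide

set_option maxHeartbeats 1000000 in
theorem give_unique_cat_tight : Claim_exact_give_unique_cat := by
  intro cat_list _hDom hD
  obtain ⟨hFS, hAuto, hAL⟩ := hD
  have hge : 7 ≤ pvBest cat_list := by
    have h := pvBest_ge_key cat_list "FinancialServices" hFS
    have h7 : pvR "FinancialServices" = 7 := rfl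
    omega
  have hle : pvBest cat_list ≤ 7 := by
    refine pvBest_le _ _ ?_
    intro j hj
    rcases pvR_mem j with h | h
    · omega
    · simp only [pvItems, List.mem_cons, List.not_mem_nil, or_false, Prod.mk.injEq] at h
      rcases h with (⟨hs,hr⟩|⟨hs,hr⟩|⟨hs,hr⟩|⟨hs,hr⟩|⟨hs,hr⟩|⟨hs,hr⟩|⟨hs,hr⟩|⟨hs,hr⟩|⟨hs,hr⟩|⟨hs,hr⟩|⟨hs,hr⟩|⟨hs,hr⟩|⟨hs,hr⟩|⟨hs,hr⟩|⟨hs,hr⟩) <;> subst hs <;>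
        first | omega | exact absurd hj (by assumption)
  have halt : give_unique_cat_alt cat_list = "Financial Services" := by
    show pvLabels.getD (pvBest cat_list) "" = _
    rw [le_antisymm hle hge]
    rfl
  rw [halt]
  have hfs := pv_fs_not_mem cat_list
  unfold give_unique_cat
  simp only [List.contains_eq_mem, Bool.or_eq_true, decide_eq_true_eq]
  rw [if_neg hAL, if_neg hAuto, if_neg hfs]
  split_ifs <;> decide
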